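-- pv_equiv track=rewrite | github.com/KDR121/PuyoPuyoRL | gym_puyopuyo_master/tests/test_tall_field.py | _reference_valid_moves
-- ===== SOURCE A (Python) =====
-- def _reference_valid_moves(lines, width):
--     valid = []
--     for x in range(7):
--         if x >= width - 1:
--             valid.append(False)
--         elif (~lines[3] & (1 << x)) | (~lines[3] & (2 << x)):
--             valid.append(True)
--         else:
--             valid.append(False)
--     for x in range(8):
--         if x >= width:
--             valid.append(False)
--         elif (lines[3] & (1 << x)):
--             valid.append(False)
--         else:
--             valid.append(True)
--     return sum(v * (1 << i) for i, v in enumerate(valid))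
-- ===== SOURCE B (Python) =====
-- def _reference_valid_moves(lines, width):
--     t = lines[3]
--     lo = min(max(width - 1, 0), 7)   # number of low (paired-column) move bits that can be valid
--     hi = min(max(width, 0), 8)       # number of high (single-column) move bits that can be valid
--     both = t & (t >> 1)              # bit x set iff columns x and x+1 are both occupied
--     return (~both & ((1 << lo) - 1)) + ((~t & ((1 << hi) - 1)) << 7)
-- ===== Notes on version B (the rewrite author's own statement) =====
-- stated objective: alternative
-- what changed: Replaces the two per-position loops, the 15-element boolean list and the enumerate-sum with a branch-free closed-form bitmask computation: both = t & (t>>1) detects adjacent occupied columns, and the two mask halves are obtained by complementing and masking with clamped-width all-ones masks, combined arithmetically.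
-- outside the precondition, e.g. on _reference_valid_moves([], 0): A returns 0, B raises IndexError; on _reference_valid_moves([1, 2, 3], -5): A returns 0, B raises IndexError
import Mathlib
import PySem

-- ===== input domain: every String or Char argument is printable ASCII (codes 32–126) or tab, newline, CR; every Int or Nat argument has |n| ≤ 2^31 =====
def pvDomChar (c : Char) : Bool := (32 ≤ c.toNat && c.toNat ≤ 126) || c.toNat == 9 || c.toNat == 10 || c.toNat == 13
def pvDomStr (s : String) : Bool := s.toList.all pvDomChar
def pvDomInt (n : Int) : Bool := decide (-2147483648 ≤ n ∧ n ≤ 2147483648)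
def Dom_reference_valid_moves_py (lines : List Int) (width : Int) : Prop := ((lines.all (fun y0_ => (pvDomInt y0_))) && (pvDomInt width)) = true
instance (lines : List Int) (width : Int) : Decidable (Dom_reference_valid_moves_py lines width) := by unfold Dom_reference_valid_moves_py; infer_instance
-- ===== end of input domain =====

-- B replaces A's two per-position loops, boolean list and enumerate-sum by a closed-form bitmask
-- computation (complement-and-mask with clamped widths); objective: alternative (same O(1) cost).

-- ===== PORT A =====
def reference_valid_moves_py (lines : List Int) (width : Int) : Int :=
  -- lines[3]; Pre_ guarantees the index exists, so the getD default is never read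
  let L := (PySem.List.pyGet? lines 3).getD 0
  let valid : List Bool :=
    (PySem.List.pyRange 0 7 1).foldl (fun valid x =>
      valid ++ [if width - 1 ≤ x then false   -- x >= width - 1
                else if PySem.Int.bor (PySem.Int.band (Int.not L) ((1:Int) <<< x.toNat))
                        (PySem.Int.band (Int.not L) ((2:Int) <<< x.toNat)) ≠ 0 then true
                else false]) []
  let valid : List Bool :=
    (PySem.List.pyRange 0 8 1).foldl (fun valid x =>
      valid ++ [if width ≤ x then false      -- x >= width
                else if PySem.Int.band L ((1:Int) <<< x.toNat) ≠ 0 then false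
                else true]) valid
  ((PySem.List.enumerate valid).map (fun p => (if p.2 then (1:Int) else 0) * ((1:Int) <<< p.1.toNat))).sum

-- ===== PORT B =====
def reference_valid_moves_py_alt (lines : List Int) (width : Int) : Int :=
  -- lines[3]; Pre_ guarantees the index exists, so the getD default is never read
  let t := (PySem.List.pyGet? lines 3).getD 0
  let lo := min (max (width - 1) 0) 7       -- number of usable paired-column slots
  let hi := min (max width 0) 8             -- number of usable single-column slots
  let both := PySem.Int.band t (t >>> 1)    -- bit x set iff columns x and x+1 both occupied
  PySem.Int.band (Int.not both) (((1:Int) <<< lo.toNat) - 1)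
    + (PySem.Int.band (Int.not t) (((1:Int) <<< hi.toNat) - 1)) <<< 7

-- ===== PRECONDITION & SPEC =====
-- Pre_ excludes the inputs with fewer than four rows: there Python A raises IndexError, except when
-- width ≤ 0, where A's short-circuit skips the lines[3] read and returns 0 while B (which always
-- reads lines[3]) raises IndexError.
def Pre_reference_valid_moves_py (lines : List Int) (width : Int) : Prop := 4 ≤ lines.length
instance (lines : List Int) (width : Int) : Decidable (Pre_reference_valid_moves_py lines width) := by unfold Pre_reference_valid_moves_py; infer_instance
def pvWitness_reference_valid_moves_py : List Int × Int := ([0, 0, 0, 5], 4)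

def Spec_reference_valid_moves_py (lines : List Int) (width : Int) (out : Int) : Prop := out = reference_valid_moves_py_alt lines width
instance (lines : List Int) (width : Int) (out : Int) : Decidable (Spec_reference_valid_moves_py lines width out) := by unfold Spec_reference_valid_moves_py; infer_instance

-- ===== CLAIM (what is proved, stated in full; the proofs are below) =====
def Claim_equal_reference_valid_moves_py : Prop := ∀ (lines : List Int) (width : Int), Dom_reference_valid_moves_py lines width → Pre_reference_valid_moves_py lines width → Spec_reference_valid_moves_py lines width (reference_valid_moves_py lines width)

-- ===== LEMMAS AND PROOFS =====


theorem pvLorZeroLeft (a b : Nat) (h : a ||| b = 0) : a = 0 := by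
  apply Nat.eq_of_testBit_eq
  intro i
  have h2 : (a ||| b).testBit i = Nat.testBit 0 i := by rw [h]
  rw [Nat.testBit_or, Nat.zero_testBit] at h2
  rw [Nat.zero_testBit]
  exact (Bool.or_eq_false_iff.mp h2).1

theorem pvNegSuccToNat (n : Nat) : (-(Int.negSucc n) - 1).toNat = n := by
  rw [Int.negSucc_eq]; omega

theorem pvBandNegSucc (a b : Nat) : PySem.Int.band (Int.negSucc a) (Int.negSucc b) = Int.negSucc (a ||| b) := by
  rw [PySem.Int.band]
  have h1 : ¬ (0:Int) ≤ Int.negSucc a := by simp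
  have h2 : ¬ (0:Int) ≤ Int.negSucc b := by simp
  simp only [h1, h2, if_false]
  rw [pvNegSuccToNat, pvNegSuccToNat, Int.negSucc_eq]
  push_cast
  ring

theorem pvBorZero (a b : Int) (ha : 0 ≤ a) (hb : 0 ≤ b) :
    PySem.Int.bor a b = 0 ↔ a = 0 ∧ b = 0 := by
  rw [PySem.Int.bor_of_nonneg ha hb]
  constructor
  · intro h
    have h0 : a.toNat ||| b.toNat = 0 := by omega
    have h1 := pvLorZeroLeft _ _ h0
    rw [Nat.lor_comm] at h0
    have h2 := pvLorZeroLeft _ _ h0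
    omega
  · rintro ⟨rfl, rfl⟩
    simp

theorem pvNotEq (y : Int) : Int.not y = -1 - y := by
  cases y <;> simp [Int.not, Int.negSucc_eq] <;> omega

theorem pvTestBitNot (y : Int) (k : Nat) : (Int.not y).testBit k = !y.testBit k := by
  cases y <;> simp [Int.not, Int.testBit]

theorem pvEmodCompl (y : Int) (c : Nat) : (-1 - y) % 2 ^ c = 2 ^ c - 1 - y % 2 ^ c := by
  have h2 : (0:Int) < 2 ^ c := by positivity
  have hy : (2:Int) ^ c * (y / 2 ^ c) + y % 2 ^ c = y := Int.ediv_add_emod y (2 ^ c)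
  have hrw : -1 - y = (2 ^ c - 1 - y % 2 ^ c) + 2 ^ c * (-(y / 2 ^ c) - 1) := by
    linear_combination hy
  have hr0 : 0 ≤ y % 2 ^ c := Int.emod_nonneg y (ne_of_gt h2)
  have hr1 : y % 2 ^ c < 2 ^ c := Int.emod_lt_of_pos y h2
  rw [hrw, Int.add_mul_emod_self_left, Int.emod_eq_of_lt (by omega) (by omega)]

theorem pvEmodStep (y : Int) (c : Nat) :
    y % 2 ^ (c + 1) = y % 2 ^ c + 2 ^ c * ((y.testBit c).toNat : Int) := by
  cases y with
  | ofNat m =>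
      have h1 : (Int.ofNat m) % 2 ^ (c + 1) = ((m % 2 ^ (c + 1) : Nat) : Int) := by push_cast; rfl
      have h2 : (Int.ofNat m) % 2 ^ c = ((m % 2 ^ c : Nat) : Int) := by push_cast; rfl
      have hb : (Int.ofNat m).testBit c = m.testBit c := rfl
      rw [h1, h2, hb, Nat.mod_pow_succ]
      have ht := Nat.toNat_testBit m c
      push_cast [ht]
      ring
  | negSucc m =>
      have hb : (Int.negSucc m).testBit c = !m.testBit c := rfl
      have hms : (Int.negSucc m : Int) = -1 - (m : Int) := by rw [Int.negSucc_eq]; ring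
      have e1 : (Int.negSucc m) % 2 ^ (c+1) = 2 ^ (c+1) - 1 - (m:Int) % 2 ^ (c+1) := by
        rw [hms, pvEmodCompl]
      have e2 : (Int.negSucc m) % 2 ^ c = 2 ^ c - 1 - (m:Int) % 2 ^ c := by
        rw [hms, pvEmodCompl]
      rw [e1, e2, hb]
      have h1 : ((m:Int)) % 2 ^ (c + 1) = ((m % 2 ^ (c + 1) : Nat) : Int) := by push_cast; rfl
      have h2 : ((m:Int)) % 2 ^ c = ((m % 2 ^ c : Nat) : Int) := by push_cast; rfl
      rw [h1, h2, Nat.mod_pow_succ]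
      have ht := Nat.toNat_testBit m c
      cases hbt : m.testBit c <;> rw [hbt] at ht <;> push_cast [Nat.mod_pow_succ, ← ht] <;> simp <;> ring

theorem pvEmodBits (y : Int) (c : Nat) :
    y % 2 ^ c = ((List.range c).map (fun x => ((y.testBit x).toNat : Int) * 2 ^ x)).sum := by
  induction c with
  | zero => simp
  | succ c ih =>
      rw [pvEmodStep, ih, List.range_succ]
      simp [List.sum_append]
      ring

theorem pvBandPow (y : Int) (c : Nat) :
    PySem.Int.band y (2 ^ c) = ((y.testBit c).toNat : Int) * 2 ^ c := by
  have hp : ((2:Int) ^ c) = ((2 ^ c : Nat) : Int) := by push_cast; ring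
  cases y with
  | ofNat m =>
      rw [hp]
      rw [show (Int.ofNat m) = ((m : Nat) : Int) from rfl, PySem.Int.band_natCast, Nat.and_two_pow]
      rw [show ((m : Nat) : Int).testBit c = m.testBit c from rfl]
      push_cast; ring
  | negSucc m =>
      have hneg : ¬ (0:Int) ≤ Int.negSucc m := by simp
      have hpos : (0:Int) ≤ 2 ^ c := by positivity
      rw [PySem.Int.band]
      simp only [hneg, if_false, hpos, if_true]
      have hm : (-(Int.negSucc m) - 1).toNat = m := pvNegSuccToNat m
      have ht : ((2:Int) ^ c).toNat = 2 ^ c := by rw [hp]; exact Int.toNat_natCast _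
      rw [hm, ht, Nat.and_comm, Nat.and_two_pow]
      rw [show (Int.negSucc m).testBit c = !m.testBit c from rfl]
      cases hbt : m.testBit c <;> simp [hbt] <;> push_cast <;> omega

theorem pvBandMask (y : Int) (c : Nat) :
    PySem.Int.band y (2 ^ c - 1) = y % 2 ^ c := by
  have h1n : (1:Nat) ≤ 2 ^ c := Nat.one_le_two_pow
  have hp : ((2:Int) ^ c - 1) = ((2 ^ c - 1 : Nat) : Int) := by push_cast [h1n]; ring
  cases y with
  | ofNat m =>
      rw [hp, show (Int.ofNat m) = ((m : Nat) : Int) from rfl, PySem.Int.band_natCast,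
        Nat.and_two_pow_sub_one_eq_mod]
      push_cast; rfl
  | negSucc m =>
      have hneg : ¬ (0:Int) ≤ Int.negSucc m := by simp
      have hpos : (0:Int) ≤ 2 ^ c - 1 := by
        have : (0:Int) < 2 ^ c := by positivity
        omega
      rw [PySem.Int.band]
      simp only [hneg, if_false, hpos, if_true]
      have hm : (-(Int.negSucc m) - 1).toNat = m := pvNegSuccToNat m
      have ht : ((2:Int) ^ c - 1).toNat = 2 ^ c - 1 := by rw [hp]; exact Int.toNat_natCast _
      rw [hm, ht, Nat.and_comm, Nat.and_two_pow_sub_one_eq_mod]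
      have e1 : (Int.negSucc m : Int) = -1 - (m : Int) := by rw [Int.negSucc_eq]; ring
      rw [e1, pvEmodCompl]
      have h2 : ((m:Int)) % 2 ^ c = ((m % 2 ^ c : Nat) : Int) := by push_cast; rfl
      rw [h2]
      have hlt : m % 2 ^ c < 2 ^ c := Nat.mod_lt _ (by positivity)
      push_cast [Nat.le_sub_one_of_lt hlt]
      omega

theorem pvBandNotMask (y : Int) (c : Nat) :
    PySem.Int.band (Int.not y) (2 ^ c - 1) = 2 ^ c - 1 - y % 2 ^ c := by
  rw [pvBandMask, pvNotEq, pvEmodCompl]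

theorem pvTestBitBoth (y : Int) (k : Nat) :
    (PySem.Int.band y (y >>> (1:Nat))).testBit k = (y.testBit k && y.testBit (k + 1)) := by
  cases y with
  | ofNat m =>
      rw [show (Int.ofNat m) >>> (1:Nat) = Int.ofNat (m >>> 1) from rfl]
      rw [show (Int.ofNat m) = ((m : Nat) : Int) from rfl,
          show (Int.ofNat (m >>> 1)) = ((m >>> 1 : Nat) : Int) from rfl, PySem.Int.band_natCast]
      rw [show ((m &&& m >>> 1 : Nat) : Int).testBit k = (m &&& m >>> 1).testBit k from rfl]
      rw [Nat.testBit_and, Nat.testBit_shiftRight]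
      rw [show ((m : Nat) : Int).testBit k = m.testBit k from rfl,
          show ((m : Nat) : Int).testBit (k+1) = m.testBit (k+1) from rfl, Nat.add_comm 1 k]
  | negSucc m =>
      rw [Int.negSucc_shiftRight, pvBandNegSucc]
      rw [show (Int.negSucc (m ||| m >>> 1)).testBit k = !(m ||| m >>> 1).testBit k from rfl]
      rw [Nat.testBit_or, Nat.testBit_shiftRight]
      rw [show (Int.negSucc m).testBit k = !m.testBit k from rfl,
          show (Int.negSucc m).testBit (k+1) = !m.testBit (k+1) from rfl, Nat.add_comm 1 k]
      cases m.testBit k <;> cases m.testBit (1 + k) <;> rfl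

theorem pvCondA (L : Int) (k : Nat) :
    (¬ PySem.Int.bor (PySem.Int.band (Int.not L) ((1:Int) <<< k)) (PySem.Int.band (Int.not L) ((2:Int) <<< k)) = 0)
      ↔ ¬(L.testBit k = true ∧ L.testBit (k + 1) = true) := by
  have h1 : ((1:Int) <<< k) = 2 ^ k := by rw [Int.shiftLeft_eq]; ring
  have h2 : ((2:Int) <<< k) = 2 ^ (k + 1) := by rw [Int.shiftLeft_eq]; ring
  have hk : (0:Int) < 2 ^ k := by positivity
  have hk1 : (0:Int) < 2 ^ (k+1) := by positivity
  rw [h1, h2, pvBandPow, pvBandPow, pvTestBitNot, pvTestBitNot,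
    pvBorZero _ _ (by positivity) (by positivity)]
  cases hb : L.testBit k <;> cases hc : L.testBit (k + 1) <;> simp <;> omega

theorem pvCondB (L : Int) (k : Nat) :
    (PySem.Int.band L ((1:Int) <<< k) = 0) ↔ L.testBit k = false := by
  have h1 : ((1:Int) <<< k) = 2 ^ k := by rw [Int.shiftLeft_eq]; ring
  rw [h1, pvBandPow]
  have hk : (0:Int) < 2 ^ k := by positivity
  cases hb : L.testBit k <;> simp <;> omega
theorem pvA0 (L : Int) :
    (¬ PySem.Int.bor (PySem.Int.band (Int.not L) 1) (PySem.Int.band (Int.not L) 2) = 0)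
      ↔ (L.testBit 0 && L.testBit 1) = false := by
  have h := pvCondA L 0
  rw [show ((1:Int) <<< (0:Nat)) = 1 from rfl, show ((2:Int) <<< (0:Nat)) = 2 from rfl] at h
  rw [h]
  cases L.testBit 0 <;> cases L.testBit 1 <;> simp
theorem pvA1 (L : Int) :
    (¬ PySem.Int.bor (PySem.Int.band (Int.not L) 2) (PySem.Int.band (Int.not L) 4) = 0)
      ↔ (L.testBit 1 && L.testBit 2) = false := by
  have h := pvCondA L 1
  rw [show ((1:Int) <<< (1:Nat)) = 2 from rfl, show ((2:Int) <<< (1:Nat)) = 4 from rfl] at h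
  rw [h]
  cases L.testBit 1 <;> cases L.testBit 2 <;> simp
theorem pvA2 (L : Int) :
    (¬ PySem.Int.bor (PySem.Int.band (Int.not L) 4) (PySem.Int.band (Int.not L) 8) = 0)
      ↔ (L.testBit 2 && L.testBit 3) = false := by
  have h := pvCondA L 2
  rw [show ((1:Int) <<< (2:Nat)) = 4 from rfl, show ((2:Int) <<< (2:Nat)) = 8 from rfl] at h
  rw [h]
  cases L.testBit 2 <;> cases L.testBit 3 <;> simp
theorem pvA3 (L : Int) :
    (¬ PySem.Int.bor (PySem.Int.band (Int.not L) 8) (PySem.Int.band (Int.not L) 16) = 0)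
      ↔ (L.testBit 3 && L.testBit 4) = false := by
  have h := pvCondA L 3
  rw [show ((1:Int) <<< (3:Nat)) = 8 from rfl, show ((2:Int) <<< (3:Nat)) = 16 from rfl] at h
  rw [h]
  cases L.testBit 3 <;> cases L.testBit 4 <;> simp
theorem pvA4 (L : Int) :
    (¬ PySem.Int.bor (PySem.Int.band (Int.not L) 16) (PySem.Int.band (Int.not L) 32) = 0)
      ↔ (L.testBit 4 && L.testBit 5) = false := by
  have h := pvCondA L 4
  rw [show ((1:Int) <<< (4:Nat)) = 16 from rfl, show ((2:Int) <<< (4:Nat)) = 32 from rfl] at h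
  rw [h]
  cases L.testBit 4 <;> cases L.testBit 5 <;> simp
theorem pvA5 (L : Int) :
    (¬ PySem.Int.bor (PySem.Int.band (Int.not L) 32) (PySem.Int.band (Int.not L) 64) = 0)
      ↔ (L.testBit 5 && L.testBit 6) = false := by
  have h := pvCondA L 5
  rw [show ((1:Int) <<< (5:Nat)) = 32 from rfl, show ((2:Int) <<< (5:Nat)) = 64 from rfl] at h
  rw [h]
  cases L.testBit 5 <;> cases L.testBit 6 <;> simp
theorem pvA6 (L : Int) :
    (¬ PySem.Int.bor (PySem.Int.band (Int.not L) 64) (PySem.Int.band (Int.not L) 128) = 0)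
      ↔ (L.testBit 6 && L.testBit 7) = false := by
  have h := pvCondA L 6
  rw [show ((1:Int) <<< (6:Nat)) = 64 from rfl, show ((2:Int) <<< (6:Nat)) = 128 from rfl] at h
  rw [h]
  cases L.testBit 6 <;> cases L.testBit 7 <;> simp
theorem pvB0 (L : Int) :
    (PySem.Int.band L 1 = 0) ↔ L.testBit 0 = false := by
  have h := pvCondB L 0
  rw [show ((1:Int) <<< (0:Nat)) = 1 from rfl] at h
  exact h
theorem pvB1 (L : Int) :
    (PySem.Int.band L 2 = 0) ↔ L.testBit 1 = false := by
  have h := pvCondB L 1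
  rw [show ((1:Int) <<< (1:Nat)) = 2 from rfl] at h
  exact h
theorem pvB2 (L : Int) :
    (PySem.Int.band L 4 = 0) ↔ L.testBit 2 = false := by
  have h := pvCondB L 2
  rw [show ((1:Int) <<< (2:Nat)) = 4 from rfl] at h
  exact h
theorem pvB3 (L : Int) :
    (PySem.Int.band L 8 = 0) ↔ L.testBit 3 = false := by
  have h := pvCondB L 3
  rw [show ((1:Int) <<< (3:Nat)) = 8 from rfl] at h
  exact h
theorem pvB4 (L : Int) :
    (PySem.Int.band L 16 = 0) ↔ L.testBit 4 = false := by
  have h := pvCondB L 4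
  rw [show ((1:Int) <<< (4:Nat)) = 16 from rfl] at h
  exact h
theorem pvB5 (L : Int) :
    (PySem.Int.band L 32 = 0) ↔ L.testBit 5 = false := by
  have h := pvCondB L 5
  rw [show ((1:Int) <<< (5:Nat)) = 32 from rfl] at h
  exact h
theorem pvB6 (L : Int) :
    (PySem.Int.band L 64 = 0) ↔ L.testBit 6 = false := by
  have h := pvCondB L 6
  rw [show ((1:Int) <<< (6:Nat)) = 64 from rfl] at h
  exact h
theorem pvB7 (L : Int) :
    (PySem.Int.band L 128 = 0) ↔ L.testBit 7 = false := by
  have h := pvCondB L 7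
  rw [show ((1:Int) <<< (7:Nat)) = 128 from rfl] at h
  exact h
theorem pvIfF (b : Bool) (z : Int) : (if b = false then z else 0) = z - (b.toNat : Int) * z := by
  cases b <;> simp

theorem pvIfImp (a b : Bool) (z : Int) :
    (if a = true → b = false then z else 0) = z - ((a && b).toNat : Int) * z := by
  cases a <;> cases b <;> simp

theorem pvShr1 (y : Int) : y >>> (1:Int) = y >>> (1:Nat) := by
  simpa using Int.shiftRight_natCast_right y 1

theorem pvTestBitBoth' (y : Int) (k : Nat) :
    (PySem.Int.band y (y >>> (1:Int))).testBit k = (y.testBit k && y.testBit (k + 1)) := by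
  rw [pvShr1]
  exact pvTestBitBoth y k
set_option maxHeartbeats 2000000 in
theorem pvKey (L width : Int) :
    (((PySem.List.enumerate
      ((PySem.List.pyRange 0 8 1).foldl (fun valid x =>
        valid ++ [if width ≤ x then false
                  else if PySem.Int.band L ((1:Int) <<< x.toNat) ≠ 0 then false
                  else true])
        ((PySem.List.pyRange 0 7 1).foldl (fun valid x =>
          valid ++ [if width - 1 ≤ x then false
                    else if PySem.Int.bor (PySem.Int.band (Int.not L) ((1:Int) <<< x.toNat))
                            (PySem.Int.band (Int.not L) ((2:Int) <<< x.toNat)) ≠ 0 then true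
                    else false]) []))).map
      (fun p => (if p.2 then (1:Int) else 0) * ((1:Int) <<< p.1.toNat))).sum)
    = PySem.Int.band (Int.not (PySem.Int.band L (L >>> (1:Int)))) (((1:Int) <<< (min (max (width - 1) 0) 7).toNat) - 1)
      + (PySem.Int.band (Int.not L) (((1:Int) <<< (min (max width 0) 8).toNat) - 1)) <<< (7:Int) := by
  have h7 : ∀ y : Int, y <<< (7:Int) = y * 128 := fun y => by
    have h := Int.shiftLeft_natCast_right y 7
    norm_num at h
    rw [h, Int.shiftLeft_eq]; norm_num
  rw [show PySem.List.pyRange 0 7 1 = [0,1,2,3,4,5,6] from by decide,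
      show PySem.List.pyRange 0 8 1 = [0,1,2,3,4,5,6,7] from by decide]
  simp only [List.foldl, List.nil_append, List.cons_append]
  simp only [PySem.List.enumerate_cons, PySem.List.enumerate_nil, List.map, List.sum_cons, List.sum_nil]
  norm_num
  simp only [show ((0:Int)).toNat = 0 from rfl,
    show ((1:Int)).toNat = 1 from rfl,
    show ((2:Int)).toNat = 2 from rfl,
    show ((3:Int)).toNat = 3 from rfl,
    show ((4:Int)).toNat = 4 from rfl,
    show ((5:Int)).toNat = 5 from rfl,
    show ((6:Int)).toNat = 6 from rfl,
    show ((7:Int)).toNat = 7 from rfl,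
    show ((8:Int)).toNat = 8 from rfl,
    show ((9:Int)).toNat = 9 from rfl,
    show ((10:Int)).toNat = 10 from rfl,
    show ((11:Int)).toNat = 11 from rfl,
    show ((12:Int)).toNat = 12 from rfl,
    show ((13:Int)).toNat = 13 from rfl,
    show ((14:Int)).toNat = 14 from rfl,
    show ((1:Int) <<< (0:Nat)) = 1 from rfl,
    show ((1:Int) <<< (1:Nat)) = 2 from rfl,
    show ((1:Int) <<< (2:Nat)) = 4 from rfl,
    show ((1:Int) <<< (3:Nat)) = 8 from rfl,
    show ((1:Int) <<< (4:Nat)) = 16 from rfl,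
    show ((1:Int) <<< (5:Nat)) = 32 from rfl,
    show ((1:Int) <<< (6:Nat)) = 64 from rfl,
    show ((1:Int) <<< (7:Nat)) = 128 from rfl,
    show ((1:Int) <<< (8:Nat)) = 256 from rfl,
    show ((1:Int) <<< (9:Nat)) = 512 from rfl,
    show ((1:Int) <<< (10:Nat)) = 1024 from rfl,
    show ((1:Int) <<< (11:Nat)) = 2048 from rfl,
    show ((1:Int) <<< (12:Nat)) = 4096 from rfl,
    show ((1:Int) <<< (13:Nat)) = 8192 from rfl,
    show ((1:Int) <<< (14:Nat)) = 16384 from rfl,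
    show ((1:Int) <<< ((0:Int))) = 1 from rfl,
    show ((1:Int) <<< ((1:Int))) = 2 from rfl,
    show ((1:Int) <<< ((2:Int))) = 4 from rfl,
    show ((1:Int) <<< ((3:Int))) = 8 from rfl,
    show ((1:Int) <<< ((4:Int))) = 16 from rfl,
    show ((1:Int) <<< ((5:Int))) = 32 from rfl,
    show ((1:Int) <<< ((6:Int))) = 64 from rfl,
    show ((1:Int) <<< ((7:Int))) = 128 from rfl,
    show ((1:Int) <<< ((8:Int))) = 256 from rfl,
    show ((1:Int) <<< ((9:Int))) = 512 from rfl,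
    show ((1:Int) <<< ((10:Int))) = 1024 from rfl,
    show ((1:Int) <<< ((11:Int))) = 2048 from rfl,
    show ((1:Int) <<< ((12:Int))) = 4096 from rfl,
    show ((1:Int) <<< ((13:Int))) = 8192 from rfl,
    show ((1:Int) <<< ((14:Int))) = 16384 from rfl,
    show ((2:Int) <<< (0:Nat)) = 2 from rfl,
    show ((2:Int) <<< (1:Nat)) = 4 from rfl,
    show ((2:Int) <<< (2:Nat)) = 8 from rfl,
    show ((2:Int) <<< (3:Nat)) = 16 from rfl,
    show ((2:Int) <<< (4:Nat)) = 32 from rfl,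
    show ((2:Int) <<< (5:Nat)) = 64 from rfl,
    show ((2:Int) <<< (6:Nat)) = 128 from rfl]
  have h10 : width ≤ 0 ∨ width = 1 ∨ width = 2 ∨ width = 3 ∨ width = 4 ∨ width = 5 ∨ width = 6 ∨ width = 7 ∨ width = 8 ∨ 9 ≤ width := by omega
  rcases h10 with hw|hw|hw|hw|hw|hw|hw|hw|hw|hw
  · -- region 0
    have hlo : min (max (width - 1) 0) 7 = (0:Int) := by omega
    have hhi : min (max width 0) 8 = (0:Int) := by omega
    rw [hlo, hhi]
    simp only [show ((0:Int)).toNat = 0 from rfl,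
      show ((1:Int)).toNat = 1 from rfl,
      show ((2:Int)).toNat = 2 from rfl,
      show ((3:Int)).toNat = 3 from rfl,
      show ((4:Int)).toNat = 4 from rfl,
      show ((5:Int)).toNat = 5 from rfl,
      show ((6:Int)).toNat = 6 from rfl,
      show ((7:Int)).toNat = 7 from rfl,
      show ((8:Int)).toNat = 8 from rfl,
      show ((1:Int) <<< (0:Nat)) = 1 from rfl, show ((1:Int) <<< (0:Nat)) = 1 from rfl]
    norm_num
    norm_num [eq_false (show ¬((0:Int) < width) from by omega), eq_false (show ¬((1:Int) < width) from by omega), eq_false (show ¬((2:Int) < width) from by omega), eq_false (show ¬((3:Int) < width) from by omega), eq_false (show ¬((4:Int) < width) from by omega), eq_false (show ¬((5:Int) < width) from by omega), eq_false (show ¬((6:Int) < width) from by omega), eq_false (show ¬((7:Int) < width) from by omega), pvA0, pvA1, pvA2, pvA3, pvA4, pvA5, pvA6, pvB0, pvB1, pvB2, pvB3, pvB4, pvB5, pvB6, pvB7, pvIfF, pvIfImp]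
    all_goals push_cast
    all_goals ring
  · -- region 1
    have hlo : min (max (width - 1) 0) 7 = (0:Int) := by omega
    have hhi : min (max width 0) 8 = (1:Int) := by omega
    rw [hlo, hhi]
    simp only [show ((0:Int)).toNat = 0 from rfl,
      show ((1:Int)).toNat = 1 from rfl,
      show ((2:Int)).toNat = 2 from rfl,
      show ((3:Int)).toNat = 3 from rfl,
      show ((4:Int)).toNat = 4 from rfl,
      show ((5:Int)).toNat = 5 from rfl,
      show ((6:Int)).toNat = 6 from rfl,
      show ((7:Int)).toNat = 7 from rfl,
      show ((8:Int)).toNat = 8 from rfl,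
      show ((1:Int) <<< (0:Nat)) = 1 from rfl, show ((1:Int) <<< (1:Nat)) = 2 from rfl]
    norm_num
    have hbh := pvBandNotMask L 1
    have heh := pvEmodBits L 1
    simp only [List.range_succ, List.range_zero, List.map_append, List.map_cons, List.map_nil,
      List.sum_append, List.sum_cons, List.sum_nil] at heh
    norm_num at hbh heh
    rw [hbh, heh, h7]
    norm_num [hw, pvA0, pvA1, pvA2, pvA3, pvA4, pvA5, pvA6, pvB0, pvB1, pvB2, pvB3, pvB4, pvB5, pvB6, pvB7, pvIfF, pvIfImp]
    all_goals push_cast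
    all_goals ring
  · -- region 2
    have hlo : min (max (width - 1) 0) 7 = (1:Int) := by omega
    have hhi : min (max width 0) 8 = (2:Int) := by omega
    rw [hlo, hhi]
    simp only [show ((0:Int)).toNat = 0 from rfl,
      show ((1:Int)).toNat = 1 from rfl,
      show ((2:Int)).toNat = 2 from rfl,
      show ((3:Int)).toNat = 3 from rfl,
      show ((4:Int)).toNat = 4 from rfl,
      show ((5:Int)).toNat = 5 from rfl,
      show ((6:Int)).toNat = 6 from rfl,
      show ((7:Int)).toNat = 7 from rfl,
      show ((8:Int)).toNat = 8 from rfl,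
      show ((1:Int) <<< (1:Nat)) = 2 from rfl, show ((1:Int) <<< (2:Nat)) = 4 from rfl]
    norm_num
    have hbl := pvBandNotMask (PySem.Int.band L (L >>> (1:Int))) 1
    have hel := pvEmodBits (PySem.Int.band L (L >>> (1:Int))) 1
    simp only [List.range_succ, List.range_zero, List.map_append, List.map_cons, List.map_nil,
      List.sum_append, List.sum_cons, List.sum_nil, pvTestBitBoth'] at hel
    norm_num at hbl hel
    rw [hbl, hel]
    have hbh := pvBandNotMask L 2
    have heh := pvEmodBits L 2
    simp only [List.range_succ, List.range_zero, List.map_append, List.map_cons, List.map_nil,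
      List.sum_append, List.sum_cons, List.sum_nil] at heh
    norm_num at hbh heh
    rw [hbh, heh, h7]
    norm_num [hw, pvA0, pvA1, pvA2, pvA3, pvA4, pvA5, pvA6, pvB0, pvB1, pvB2, pvB3, pvB4, pvB5, pvB6, pvB7, pvIfF, pvIfImp]
    all_goals push_cast
    all_goals ring
  · -- region 3
    have hlo : min (max (width - 1) 0) 7 = (2:Int) := by omega
    have hhi : min (max width 0) 8 = (3:Int) := by omega
    rw [hlo, hhi]
    simp only [show ((0:Int)).toNat = 0 from rfl,
      show ((1:Int)).toNat = 1 from rfl,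
      show ((2:Int)).toNat = 2 from rfl,
      show ((3:Int)).toNat = 3 from rfl,
      show ((4:Int)).toNat = 4 from rfl,
      show ((5:Int)).toNat = 5 from rfl,
      show ((6:Int)).toNat = 6 from rfl,
      show ((7:Int)).toNat = 7 from rfl,
      show ((8:Int)).toNat = 8 from rfl,
      show ((1:Int) <<< (2:Nat)) = 4 from rfl, show ((1:Int) <<< (3:Nat)) = 8 from rfl]
    norm_num
    have hbl := pvBandNotMask (PySem.Int.band L (L >>> (1:Int))) 2
    have hel := pvEmodBits (PySem.Int.band L (L >>> (1:Int))) 2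
    simp only [List.range_succ, List.range_zero, List.map_append, List.map_cons, List.map_nil,
      List.sum_append, List.sum_cons, List.sum_nil, pvTestBitBoth'] at hel
    norm_num at hbl hel
    rw [hbl, hel]
    have hbh := pvBandNotMask L 3
    have heh := pvEmodBits L 3
    simp only [List.range_succ, List.range_zero, List.map_append, List.map_cons, List.map_nil,
      List.sum_append, List.sum_cons, List.sum_nil] at heh
    norm_num at hbh heh
    rw [hbh, heh, h7]
    norm_num [hw, pvA0, pvA1, pvA2, pvA3, pvA4, pvA5, pvA6, pvB0, pvB1, pvB2, pvB3, pvB4, pvB5, pvB6, pvB7, pvIfF, pvIfImp]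
    all_goals push_cast
    all_goals ring
  · -- region 4
    have hlo : min (max (width - 1) 0) 7 = (3:Int) := by omega
    have hhi : min (max width 0) 8 = (4:Int) := by omega
    rw [hlo, hhi]
    simp only [show ((0:Int)).toNat = 0 from rfl,
      show ((1:Int)).toNat = 1 from rfl,
      show ((2:Int)).toNat = 2 from rfl,
      show ((3:Int)).toNat = 3 from rfl,
      show ((4:Int)).toNat = 4 from rfl,
      show ((5:Int)).toNat = 5 from rfl,
      show ((6:Int)).toNat = 6 from rfl,
      show ((7:Int)).toNat = 7 from rfl,
      show ((8:Int)).toNat = 8 from rfl,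
      show ((1:Int) <<< (3:Nat)) = 8 from rfl, show ((1:Int) <<< (4:Nat)) = 16 from rfl]
    norm_num
    have hbl := pvBandNotMask (PySem.Int.band L (L >>> (1:Int))) 3
    have hel := pvEmodBits (PySem.Int.band L (L >>> (1:Int))) 3
    simp only [List.range_succ, List.range_zero, List.map_append, List.map_cons, List.map_nil,
      List.sum_append, List.sum_cons, List.sum_nil, pvTestBitBoth'] at hel
    norm_num at hbl hel
    rw [hbl, hel]
    have hbh := pvBandNotMask L 4
    have heh := pvEmodBits L 4
    simp only [List.range_succ, List.range_zero, List.map_append, List.map_cons, List.map_nil,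
      List.sum_append, List.sum_cons, List.sum_nil] at heh
    norm_num at hbh heh
    rw [hbh, heh, h7]
    norm_num [hw, pvA0, pvA1, pvA2, pvA3, pvA4, pvA5, pvA6, pvB0, pvB1, pvB2, pvB3, pvB4, pvB5, pvB6, pvB7, pvIfF, pvIfImp]
    all_goals push_cast
    all_goals ring
  · -- region 5
    have hlo : min (max (width - 1) 0) 7 = (4:Int) := by omega
    have hhi : min (max width 0) 8 = (5:Int) := by omega
    rw [hlo, hhi]
    simp only [show ((0:Int)).toNat = 0 from rfl,
      show ((1:Int)).toNat = 1 from rfl,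
      show ((2:Int)).toNat = 2 from rfl,
      show ((3:Int)).toNat = 3 from rfl,
      show ((4:Int)).toNat = 4 from rfl,
      show ((5:Int)).toNat = 5 from rfl,
      show ((6:Int)).toNat = 6 from rfl,
      show ((7:Int)).toNat = 7 from rfl,
      show ((8:Int)).toNat = 8 from rfl,
      show ((1:Int) <<< (4:Nat)) = 16 from rfl, show ((1:Int) <<< (5:Nat)) = 32 from rfl]
    norm_num
    have hbl := pvBandNotMask (PySem.Int.band L (L >>> (1:Int))) 4
    have hel := pvEmodBits (PySem.Int.band L (L >>> (1:Int))) 4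
    simp only [List.range_succ, List.range_zero, List.map_append, List.map_cons, List.map_nil,
      List.sum_append, List.sum_cons, List.sum_nil, pvTestBitBoth'] at hel
    norm_num at hbl hel
    rw [hbl, hel]
    have hbh := pvBandNotMask L 5
    have heh := pvEmodBits L 5
    simp only [List.range_succ, List.range_zero, List.map_append, List.map_cons, List.map_nil,
      List.sum_append, List.sum_cons, List.sum_nil] at heh
    norm_num at hbh heh
    rw [hbh, heh, h7]
    norm_num [hw, pvA0, pvA1, pvA2, pvA3, pvA4, pvA5, pvA6, pvB0, pvB1, pvB2, pvB3, pvB4, pvB5, pvB6, pvB7, pvIfF, pvIfImp]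
    all_goals push_cast
    all_goals ring
  · -- region 6
    have hlo : min (max (width - 1) 0) 7 = (5:Int) := by omega
    have hhi : min (max width 0) 8 = (6:Int) := by omega
    rw [hlo, hhi]
    simp only [show ((0:Int)).toNat = 0 from rfl,
      show ((1:Int)).toNat = 1 from rfl,
      show ((2:Int)).toNat = 2 from rfl,
      show ((3:Int)).toNat = 3 from rfl,
      show ((4:Int)).toNat = 4 from rfl,
      show ((5:Int)).toNat = 5 from rfl,
      show ((6:Int)).toNat = 6 from rfl,
      show ((7:Int)).toNat = 7 from rfl,
      show ((8:Int)).toNat = 8 from rfl,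
      show ((1:Int) <<< (5:Nat)) = 32 from rfl, show ((1:Int) <<< (6:Nat)) = 64 from rfl]
    norm_num
    have hbl := pvBandNotMask (PySem.Int.band L (L >>> (1:Int))) 5
    have hel := pvEmodBits (PySem.Int.band L (L >>> (1:Int))) 5
    simp only [List.range_succ, List.range_zero, List.map_append, List.map_cons, List.map_nil,
      List.sum_append, List.sum_cons, List.sum_nil, pvTestBitBoth'] at hel
    norm_num at hbl hel
    rw [hbl, hel]
    have hbh := pvBandNotMask L 6
    have heh := pvEmodBits L 6
    simp only [List.range_succ, List.range_zero, List.map_append, List.map_cons, List.map_nil,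
      List.sum_append, List.sum_cons, List.sum_nil] at heh
    norm_num at hbh heh
    rw [hbh, heh, h7]
    norm_num [hw, pvA0, pvA1, pvA2, pvA3, pvA4, pvA5, pvA6, pvB0, pvB1, pvB2, pvB3, pvB4, pvB5, pvB6, pvB7, pvIfF, pvIfImp]
    all_goals push_cast
    all_goals ring
  · -- region 7
    have hlo : min (max (width - 1) 0) 7 = (6:Int) := by omega
    have hhi : min (max width 0) 8 = (7:Int) := by omega
    rw [hlo, hhi]
    simp only [show ((0:Int)).toNat = 0 from rfl,
      show ((1:Int)).toNat = 1 from rfl,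
      show ((2:Int)).toNat = 2 from rfl,
      show ((3:Int)).toNat = 3 from rfl,
      show ((4:Int)).toNat = 4 from rfl,
      show ((5:Int)).toNat = 5 from rfl,
      show ((6:Int)).toNat = 6 from rfl,
      show ((7:Int)).toNat = 7 from rfl,
      show ((8:Int)).toNat = 8 from rfl,
      show ((1:Int) <<< (6:Nat)) = 64 from rfl, show ((1:Int) <<< (7:Nat)) = 128 from rfl]
    norm_num
    have hbl := pvBandNotMask (PySem.Int.band L (L >>> (1:Int))) 6
    have hel := pvEmodBits (PySem.Int.band L (L >>> (1:Int))) 6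
    simp only [List.range_succ, List.range_zero, List.map_append, List.map_cons, List.map_nil,
      List.sum_append, List.sum_cons, List.sum_nil, pvTestBitBoth'] at hel
    norm_num at hbl hel
    rw [hbl, hel]
    have hbh := pvBandNotMask L 7
    have heh := pvEmodBits L 7
    simp only [List.range_succ, List.range_zero, List.map_append, List.map_cons, List.map_nil,
      List.sum_append, List.sum_cons, List.sum_nil] at heh
    norm_num at hbh heh
    rw [hbh, heh, h7]
    norm_num [hw, pvA0, pvA1, pvA2, pvA3, pvA4, pvA5, pvA6, pvB0, pvB1, pvB2, pvB3, pvB4, pvB5, pvB6, pvB7, pvIfF, pvIfImp]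
    all_goals push_cast
    all_goals ring
  · -- region 8
    have hlo : min (max (width - 1) 0) 7 = (7:Int) := by omega
    have hhi : min (max width 0) 8 = (8:Int) := by omega
    rw [hlo, hhi]
    simp only [show ((0:Int)).toNat = 0 from rfl,
      show ((1:Int)).toNat = 1 from rfl,
      show ((2:Int)).toNat = 2 from rfl,
      show ((3:Int)).toNat = 3 from rfl,
      show ((4:Int)).toNat = 4 from rfl,
      show ((5:Int)).toNat = 5 from rfl,
      show ((6:Int)).toNat = 6 from rfl,
      show ((7:Int)).toNat = 7 from rfl,
      show ((8:Int)).toNat = 8 from rfl,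
      show ((1:Int) <<< (7:Nat)) = 128 from rfl, show ((1:Int) <<< (8:Nat)) = 256 from rfl]
    norm_num
    have hbl := pvBandNotMask (PySem.Int.band L (L >>> (1:Int))) 7
    have hel := pvEmodBits (PySem.Int.band L (L >>> (1:Int))) 7
    simp only [List.range_succ, List.range_zero, List.map_append, List.map_cons, List.map_nil,
      List.sum_append, List.sum_cons, List.sum_nil, pvTestBitBoth'] at hel
    norm_num at hbl hel
    rw [hbl, hel]
    have hbh := pvBandNotMask L 8
    have heh := pvEmodBits L 8
    simp only [List.range_succ, List.range_zero, List.map_append, List.map_cons, List.map_nil,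
      List.sum_append, List.sum_cons, List.sum_nil] at heh
    norm_num at hbh heh
    rw [hbh, heh, h7]
    norm_num [hw, pvA0, pvA1, pvA2, pvA3, pvA4, pvA5, pvA6, pvB0, pvB1, pvB2, pvB3, pvB4, pvB5, pvB6, pvB7, pvIfF, pvIfImp]
    all_goals push_cast
    all_goals ring
  · -- region 9
    have hlo : min (max (width - 1) 0) 7 = (7:Int) := by omega
    have hhi : min (max width 0) 8 = (8:Int) := by omega
    rw [hlo, hhi]
    simp only [show ((0:Int)).toNat = 0 from rfl,
      show ((1:Int)).toNat = 1 from rfl,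
      show ((2:Int)).toNat = 2 from rfl,
      show ((3:Int)).toNat = 3 from rfl,
      show ((4:Int)).toNat = 4 from rfl,
      show ((5:Int)).toNat = 5 from rfl,
      show ((6:Int)).toNat = 6 from rfl,
      show ((7:Int)).toNat = 7 from rfl,
      show ((8:Int)).toNat = 8 from rfl,
      show ((1:Int) <<< (7:Nat)) = 128 from rfl, show ((1:Int) <<< (8:Nat)) = 256 from rfl]
    norm_num
    have hbl := pvBandNotMask (PySem.Int.band L (L >>> (1:Int))) 7
    have hel := pvEmodBits (PySem.Int.band L (L >>> (1:Int))) 7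
    simp only [List.range_succ, List.range_zero, List.map_append, List.map_cons, List.map_nil,
      List.sum_append, List.sum_cons, List.sum_nil, pvTestBitBoth'] at hel
    norm_num at hbl hel
    rw [hbl, hel]
    have hbh := pvBandNotMask L 8
    have heh := pvEmodBits L 8
    simp only [List.range_succ, List.range_zero, List.map_append, List.map_cons, List.map_nil,
      List.sum_append, List.sum_cons, List.sum_nil] at heh
    norm_num at hbh heh
    rw [hbh, heh, h7]
    norm_num [eq_true (show ((0:Int) < width) from by omega), eq_true (show ((1:Int) < width) from by omega), eq_true (show ((2:Int) < width) from by omega), eq_true (show ((3:Int) < width) from by omega), eq_true (show ((4:Int) < width) from by omega), eq_true (show ((5:Int) < width) from by omega), eq_true (show ((6:Int) < width) from by omega), eq_true (show ((7:Int) < width) from by omega), pvA0, pvA1, pvA2, pvA3, pvA4, pvA5, pvA6, pvB0, pvB1, pvB2, pvB3, pvB4, pvB5, pvB6, pvB7, pvIfF, pvIfImp]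
    all_goals push_cast
    all_goals ring

-- ===== VERDICT (by name: the statement is the Claim_ definition above) =====
theorem reference_valid_moves_py_spec : Claim_equal_reference_valid_moves_py := by
  intro lines width _ _
  unfold Spec_reference_valid_moves_py reference_valid_moves_py reference_valid_moves_py_alt
  exact pvKey ((PySem.List.pyGet? lines 3).getD 0) width
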